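-- pv_equiv track=rewrite | github.com/MatthewJBarnett/Emprical-Mesa-Optimization | common.py | path_valid
-- ===== SOURCE A (Python) =====
-- def path_valid(path, v):
--     """Checks if a path is valid"""
--     acc = 0
--     for i in path:
--         if i in v:
--             acc += 1
--         else:
--             acc -= 1
--         if acc < 0: return False
--     return True
-- ===== SOURCE B (Python) =====
-- def path_valid(path, v):
--     """Checks if a path is valid"""
--     vs = set(v)
--     drops = [j for j, x in enumerate(path) if x not in vs]
--     return all(2 * k + 1 <= j for k, j in enumerate(drops))
-- ===== Notes on version B (the rewrite author's own statement) =====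
-- stated objective: alternative
-- what changed: Instead of simulating a running prefix sum with early return, B collects the indices of non-member elements and checks the arithmetic condition 2k+1 <= j for the k-th such index j, which characterises non-negativity of all prefix sums.
import Mathlib
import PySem

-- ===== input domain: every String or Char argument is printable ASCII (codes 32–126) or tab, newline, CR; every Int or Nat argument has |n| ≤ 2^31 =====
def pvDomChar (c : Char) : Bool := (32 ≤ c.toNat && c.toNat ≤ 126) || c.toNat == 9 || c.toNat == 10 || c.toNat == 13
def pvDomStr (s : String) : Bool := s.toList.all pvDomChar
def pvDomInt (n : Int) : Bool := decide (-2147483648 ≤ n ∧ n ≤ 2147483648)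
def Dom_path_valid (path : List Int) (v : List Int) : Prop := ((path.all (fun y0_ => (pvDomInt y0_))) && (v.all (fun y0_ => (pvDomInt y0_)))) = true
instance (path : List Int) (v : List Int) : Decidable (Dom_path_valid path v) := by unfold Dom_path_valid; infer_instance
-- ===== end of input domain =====

-- B replaces A's running prefix-sum simulation by a different characterisation:
-- it collects the indices of the non-member (drop) elements and checks 2k+1 <= j
-- for the k-th such index j (alternative algorithm, same cost class).

-- ===== PORT A =====
-- the loop with its early return, as structural recursion over path with accumulator acc
def pathValidLoop (path : List Int) (v : List Int) (acc : Int) : Bool :=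
  match path with
  | [] => true
  | i :: rest =>
    let acc' := if v.contains i then acc + 1 else acc - 1
    if acc' < 0 then false else pathValidLoop rest v acc'

def path_valid (path : List Int) (v : List Int) : Bool :=
  pathValidLoop path v 0

-- ===== PORT B =====
def path_valid_alt (path : List Int) (v : List Int) : Bool :=
  let vs := PySem.Set.ofList v                       -- vs = set(v)
  let drops := (PySem.List.enumerate path).filterMap  -- [j for j, x in enumerate(path) if x not in vs]
    (fun jx => if PySem.Set.contains vs jx.2 then none else some jx.1)
  (PySem.List.enumerate drops).all                    -- all(2*k + 1 <= j for k, j in enumerate(drops))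
    (fun kj => decide (2 * kj.1 + 1 ≤ kj.2))

-- ===== PRECONDITION & SPEC =====
def Spec_path_valid (path : List Int) (v : List Int) (out : Bool) : Prop := out = path_valid_alt path v
instance (path : List Int) (v : List Int) (out : Bool) : Decidable (Spec_path_valid path v out) := by unfold Spec_path_valid; infer_instance

-- ===== CLAIM (what is proved, stated in full; the proofs are below) =====
def Claim_equal_path_valid : Prop := ∀ (path : List Int) (v : List Int), Dom_path_valid path v → Spec_path_valid path v (path_valid path v)

-- ===== LEMMAS AND PROOFS =====

theorem set_contains_ofList_eq (v : List Int) (i : Int) :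
    PySem.Set.contains (PySem.Set.ofList v) i = v.contains i := by
  rw [Bool.eq_iff_iff]
  simp [PySem.Set.contains, PySem.Set.mem_ofList]

-- the drop-index list of path relative to membership list v, positions starting at s
def dropIdx (path : List Int) (v : List Int) (s : Int) : List Int :=
  match path with
  | [] => []
  | i :: rest =>
    if v.contains i then dropIdx rest v (s + 1) else s :: dropIdx rest v (s + 1)

theorem dropIdx_eq_filterMap (path v : List Int) (s : Int) :
    dropIdx path v s =
      (PySem.List.enumerate path s).filterMap
        (fun jx => if v.contains jx.2 then none else some jx.1) := by
  induction path generalizing s with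
  | nil => simp [dropIdx, PySem.List.enumerate_nil]
  | cons i rest ih =>
    by_cases h : i ∈ v <;>
      simp [dropIdx, PySem.List.enumerate_cons, h, ih, List.contains_eq_mem]

-- sequential check: k-th remaining drop index j must satisfy c + 2k ≤ j
def chk (l : List Int) (c : Int) : Bool :=
  match l with
  | [] => true
  | j :: rest => decide (c ≤ j) && chk rest (c + 2)

theorem chk_eq_all_enumerate (l : List Int) (c : Int) :
    chk l c = (PySem.List.enumerate l).all (fun kj => decide (2 * kj.1 + c ≤ kj.2)) := by
  suffices h : ∀ (s : Int), chk l (2 * s + c) =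
      (PySem.List.enumerate l s).all (fun kj => decide (2 * kj.1 + c ≤ kj.2)) by
    have := h 0; simpa using this
  induction l with
  | nil => intro s; simp [chk, PySem.List.enumerate_nil]
  | cons j rest ih =>
    intro s
    have h2 : 2 * s + c + 2 = 2 * (s + 1) + c := by ring
    simp [chk, PySem.List.enumerate_cons, h2, ih (s + 1)]

theorem chk_dropIdx_shift (path v : List Int) (s c : Int) :
    chk (dropIdx path v (s + 1)) c = chk (dropIdx path v s) (c - 1) := by
  induction path generalizing s c with
  | nil => simp [dropIdx, chk]
  | cons i rest ih =>
    by_cases h : i ∈ v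
    · simp [dropIdx, h, ih, List.contains_eq_mem]
    · simp only [dropIdx, List.contains_eq_mem, h, decide_false, Bool.false_eq_true, if_false, chk]
      rw [ih, show c + 2 - 1 = c - 1 + 2 from by ring]
      congr 1
      rw [Bool.eq_iff_iff]; constructor <;> (intro hh; simp at hh ⊢; omega)

theorem loop_eq_chk (path v : List Int) (acc : Int) (hacc : 0 ≤ acc) :
    pathValidLoop path v acc = chk (dropIdx path v 0) (1 - acc) := by
  induction path generalizing acc with
  | nil => simp [pathValidLoop, dropIdx, chk]
  | cons i rest ih =>
    by_cases h : v.contains i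
    · simp only [pathValidLoop, dropIdx, h, if_true]
      rw [if_neg (by omega), ih (acc + 1) (by omega)]
      have := chk_dropIdx_shift rest v 0 (1 - acc)
      simp only [zero_add] at this
      simp only [zero_add]
      rw [this]
      congr 1; ring
    · simp only [pathValidLoop, dropIdx, h, Bool.false_eq_true, if_false, chk]
      by_cases h0 : acc - 1 < 0
      · rw [if_pos h0]
        have : ¬ (1 - acc ≤ (0 : Int)) := by omega
        simp [this]
      · rw [if_neg h0, ih (acc - 1) (by omega)]
        have h1 : (1 - acc ≤ (0 : Int)) := by omega
        have := chk_dropIdx_shift rest v 0 (1 - acc + 2)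
        simp only [zero_add] at this
        simp only [zero_add]
        rw [this]
        have h2 : 1 - acc + 2 - 1 = 1 - (acc - 1) := by ring
        simp [h1, h2]

-- ===== VERDICT (by name: the statement is the Claim_ definition above) =====
theorem path_valid_spec : Claim_equal_path_valid := by
  intro path v _
  unfold Spec_path_valid path_valid path_valid_alt
  simp only [set_contains_ofList_eq]
  rw [← dropIdx_eq_filterMap path v 0]
  rw [loop_eq_chk path v 0 le_rfl]
  have := chk_eq_all_enumerate (dropIdx path v 0) 1
  simpa using this
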